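-- pv_equiv track=rewrite | github.com/ecmwf/anemoi-core | models/tests/migrations/test_migration_order.py | in_incorrect_order
-- ===== SOURCE A (Python) =====
-- def in_incorrect_order(all_migrations: list[str], new_migrations: list[str]) -> tuple[list[str], str | None]:
--     """Tests whether the order of the new migrations is correct.
--     All new migrations should be at the end of all_migrations.
--
--     Parameters
--     ----------
--     all_migrations : list[str]
--         All migrations currently in anemoi-models
--     new_migrations : list[str]
--         New migrations from this PR.
--
--     Returns
--     -------
--     tuple[list[str], str | None]
--         * the list of name in incorrect order
--         * the name of the last migration in main
--     """
--     stop_new = False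
--     incorrect_order: list[str] = []
--     last_name: str | None = None
--
--     for name in reversed(all_migrations):
--         if name not in new_migrations and not stop_new:
--             stop_new = True
--             last_name = name
--         elif stop_new and name in new_migrations:
--             incorrect_order.append(name)
--     return list(reversed(incorrect_order)), last_name
-- ===== SOURCE B (Python) =====
-- def in_incorrect_order(all_migrations: list[str], new_migrations: list[str]) -> tuple[list[str], str | None]:
--     """Locate the last non-new migration, then filter the prefix before it."""
--     new_set = set(new_migrations)
--     k = len(all_migrations)
--     while k > 0 and all_migrations[k - 1] in new_set:
--         k -= 1
--     if k == 0:
--         return [], None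
--     return [m for m in all_migrations[: k - 1] if m in new_set], all_migrations[k - 1]
-- ===== Notes on version B (the rewrite author's own statement) =====
-- stated objective: faster
-- what changed: Replaces the single stateful reversed-flag loop with list-membership tests by a locate-the-boundary scan from the end (index of the last non-new migration) followed by a membership filter of the prefix before it, with a set replacing the repeated list scans.
import Mathlib
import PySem

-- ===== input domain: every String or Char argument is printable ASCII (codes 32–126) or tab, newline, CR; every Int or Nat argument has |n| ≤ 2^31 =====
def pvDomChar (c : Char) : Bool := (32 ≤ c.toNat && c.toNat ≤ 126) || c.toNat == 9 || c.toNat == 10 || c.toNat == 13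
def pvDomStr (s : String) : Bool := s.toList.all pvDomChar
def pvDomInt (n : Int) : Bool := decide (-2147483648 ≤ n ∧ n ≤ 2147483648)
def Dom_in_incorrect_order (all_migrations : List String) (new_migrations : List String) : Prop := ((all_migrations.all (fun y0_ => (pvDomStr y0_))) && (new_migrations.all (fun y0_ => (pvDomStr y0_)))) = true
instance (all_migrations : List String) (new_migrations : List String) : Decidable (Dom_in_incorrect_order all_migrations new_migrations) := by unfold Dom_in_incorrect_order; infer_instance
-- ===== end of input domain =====

-- B replaces A's single stateful reversed-flag loop (list membership per step) by a
-- locate-the-boundary scan from the end plus a set-membership filter of the prefix (objective: faster).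

-- ===== PORT A =====
-- one iteration of A's 'for name in reversed(all_migrations)' loop;
-- state = (stop_new, incorrect_order, last_name)
def aStep (new_migrations : List String) (st : Bool × List String × Option String)
    (name : String) : Bool × List String × Option String :=
  if !(new_migrations.contains name) && !st.1 then (true, st.2.1, some name)
  else if st.1 && new_migrations.contains name then (st.1, st.2.1 ++ [name], st.2.2)
  else st

def in_incorrect_order (all_migrations : List String) (new_migrations : List String) :
    List String × Option String :=
  let st := all_migrations.reverse.foldl (aStep new_migrations) (false, [], none)
  (st.2.1.reverse, st.2.2)

-- ===== PORT B =====
-- the Python 'while k > 0 and all_migrations[k-1] in new_set: k -= 1' loop;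
-- all_migrations[k-1] is always in range here (k ≤ len), so getD is exact
def altScan (new_set : PySem.Set String) (all_migrations : List String) : Nat → Nat
  | 0 => 0
  | k + 1 =>
      if new_set.contains (all_migrations.getD k "") then altScan new_set all_migrations k
      else k + 1

def in_incorrect_order_alt (all_migrations : List String) (new_migrations : List String) :
    List String × Option String :=
  let new_set := PySem.Set.ofList new_migrations
  let k := altScan new_set all_migrations all_migrations.length
  if k = 0 then ([], none)
  else ((all_migrations.take (k - 1)).filter (fun m => new_set.contains m),
        some (all_migrations.getD (k - 1) ""))

-- ===== PRECONDITION & SPEC =====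
def Spec_in_incorrect_order (all_migrations : List String) (new_migrations : List String) (out : List String × Option String) : Prop := out = in_incorrect_order_alt all_migrations new_migrations
instance (all_migrations : List String) (new_migrations : List String) (out : List String × Option String) : Decidable (Spec_in_incorrect_order all_migrations new_migrations out) := by unfold Spec_in_incorrect_order; infer_instance

-- ===== CLAIM (what is proved, stated in full; the proofs are below) =====
def Claim_equal_in_incorrect_order : Prop := ∀ (all_migrations : List String) (new_migrations : List String), Dom_in_incorrect_order all_migrations new_migrations → Spec_in_incorrect_order all_migrations new_migrations (in_incorrect_order all_migrations new_migrations)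

-- ===== LEMMAS AND PROOFS =====

lemma contains_ofList (new : List String) (m : String) :
    (PySem.Set.ofList new).contains m = new.contains m := by
  by_cases h : m ∈ new <;> simp [h, PySem.Set.mem_ofList]

-- phase 2 of A's loop (stop_new = true): it just collects the members of new_migrations
lemma foldl_aStep_true (new : List String) (l : List String) :
    ∀ (inc : List String) (last : Option String),
      l.foldl (aStep new) (true, inc, last) =
        (true, inc ++ l.filter (fun n => new.contains n), last) := by
  induction l with
  | nil => intro inc last; simp
  | cons h t ih =>
      intro inc last
      by_cases hc : h ∈ new <;> simp [aStep, hc, ih]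

-- full characterisation of A's fold from the initial state
lemma foldl_aStep_char (new : List String) (l : List String) :
    l.foldl (aStep new) (false, [], none) =
      match l.dropWhile (fun n => new.contains n) with
      | [] => (false, [], none)
      | x :: t => (true, t.filter (fun n => new.contains n), some x) := by
  induction l with
  | nil => simp
  | cons h t ih =>
      by_cases hc : h ∈ new
      · rw [List.foldl_cons]
        have hs : aStep new (false, [], none) h = (false, [], none) := by
          simp [aStep, hc]
        rw [hs, ih]
        simp [hc]
      · rw [List.foldl_cons]
        have hs : aStep new (false, [], none) h = (true, [], some h) := by
          simp [aStep, hc]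
        rw [hs, foldl_aStep_true]
        simp [hc]

-- B's scan counts the length of the dropWhile-suffix of the reversed prefix
lemma altScan_eq (new : List String) (all : List String) :
    ∀ k, k ≤ all.length →
      altScan (PySem.Set.ofList new) all k =
        (((all.take k).reverse).dropWhile (fun n => new.contains n)).length := by
  intro k
  induction k with
  | zero => intro _; simp [altScan]
  | succ k ih =>
      intro hk
      have hklt : k < all.length := Nat.lt_of_succ_le hk
      have hget : all.getD k "" = all[k] := List.getD_eq_getElem all "" hklt
      have htake : (all.take (k + 1)).reverse = all[k] :: (all.take k).reverse := by
        rw [List.take_add_one]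
        simp [List.getElem?_eq_getElem hklt]
      rw [show altScan (PySem.Set.ofList new) all (k + 1)
            = if (PySem.Set.ofList new).contains (all.getD k "")
              then altScan (PySem.Set.ofList new) all k else k + 1 from rfl]
      rw [contains_ofList, hget, htake]
      by_cases hc : all[k] ∈ new
      · simp [hc, ih (Nat.le_of_lt hklt)]
      · simp [hc, Nat.min_eq_left (Nat.le_of_lt hklt)]

-- ===== VERDICT (by name: the statement is the Claim_ definition above) =====
theorem in_incorrect_order_spec : Claim_equal_in_incorrect_order := by
  intro all new _
  show in_incorrect_order all new = in_incorrect_order_alt all new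
  simp only [in_incorrect_order, in_incorrect_order_alt]
  rw [foldl_aStep_char, altScan_eq new all all.length (Nat.le_refl _), List.take_length]
  have hsplit := List.takeWhile_append_dropWhile
    (p := fun n => new.contains n) (l := all.reverse)
  set w := all.reverse.takeWhile (fun n => new.contains n) with hw
  cases hd : all.reverse.dropWhile (fun n => new.contains n) with
  | nil => simp
  | cons x t =>
      have hall : all = t.reverse ++ x :: w.reverse := by
        have h1 : all.reverse = w ++ x :: t := by rw [← hd, hsplit]
        calc all = all.reverse.reverse := by rw [List.reverse_reverse]
          _ = t.reverse ++ x :: w.reverse := by rw [h1]; simp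
      have htakelen : all.take t.length = t.reverse := by
        rw [hall, ← List.length_reverse (as := t), List.take_left]
      have hgetd : all.getD t.length "" = x := by
        have h2 : all[t.length]? = some x := by
          rw [hall, List.getElem?_append_right (by simp)]
          simp
        simp [List.getD_eq_getElem?_getD, h2]
      simp only [List.length_cons, Nat.add_sub_cancel]
      rw [if_neg (Nat.succ_ne_zero _), htakelen, hgetd]
      simp [List.filter_reverse]
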